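-- pv_equiv track=rewrite | github.com/taylor-mitchell/BinaryMatrixFunctions_LightsOutSolver | lightsOut.py | make_identity
-- ===== SOURCE A (Python) =====
-- def make_identity(width, height):
--     to_return = []
--     for i in range(0, width):
--         row = []
--         for j in range(0, height):
--             if j == i:
--                 row.append(1)
--             else:
--                 row.append(0)
--         to_return.append(row)
--     return to_return
-- ===== SOURCE B (Python) =====
-- def make_identity(width, height):
--     rows = []
--     row = [1] + [0] * (height - 1) if height > 0 else []
--     for _ in range(width):
--         rows.append(row)
--         row = ([0] + row)[:height]
--     return rows
-- ===== Notes on version B (the rewrite author's own statement) =====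
-- stated objective: alternative
-- what changed: B builds the matrix by a shift recurrence: it constructs only the first row [1,0,...,0] explicitly and derives each next row from the previous one by prepending a 0 and truncating to height, instead of A's nested loops appending a value per cell after a j==i test.
import Mathlib
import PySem

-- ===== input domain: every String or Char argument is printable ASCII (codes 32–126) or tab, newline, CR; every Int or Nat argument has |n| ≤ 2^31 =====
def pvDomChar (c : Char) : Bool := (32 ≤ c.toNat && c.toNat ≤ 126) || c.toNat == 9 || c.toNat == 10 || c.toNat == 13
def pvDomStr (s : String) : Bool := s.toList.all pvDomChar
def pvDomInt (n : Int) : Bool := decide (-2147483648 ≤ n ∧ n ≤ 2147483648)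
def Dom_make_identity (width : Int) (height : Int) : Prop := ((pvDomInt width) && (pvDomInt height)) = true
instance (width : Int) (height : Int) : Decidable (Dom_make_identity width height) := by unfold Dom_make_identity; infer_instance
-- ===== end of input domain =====

-- B builds only the first row explicitly and derives each next row by a shift recurrence (prepend 0, truncate to height).

-- ===== PORT A =====
-- literal port of A: outer loop appends rows, inner loop appends 1 on the diagonal, 0 elsewhere
def make_identity (width : Int) (height : Int) : List (List Int) :=
  (PySem.List.pyRange 0 width 1).foldl
    (fun to_return i =>
      to_return ++ [(PySem.List.pyRange 0 height 1).foldl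
        (fun row j => row ++ [if j = i then (1 : Int) else 0]) []])
    []

-- ===== PORT B =====
-- literal port of Source B: row = [1]+[0]*(height-1) if height > 0 else []; each iteration appends row
-- and rebinds row = ([0] + row)[:height] (the slice ported exactly with PySem.List.slice).
def make_identity_alt (width : Int) (height : Int) : List (List Int) :=
  let row0 : List Int := if 0 < height then (1 : Int) :: List.replicate (height - 1).toNat 0 else []
  let st := (PySem.List.pyRange 0 width 1).foldl
    (fun (st : List (List Int) × List Int) _ =>
      (st.1 ++ [st.2], PySem.List.slice ((0 : Int) :: st.2) none (some height)))
    ([], row0)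
  st.1

-- ===== PRECONDITION & SPEC =====
def Spec_make_identity (width : Int) (height : Int) (out : List (List Int)) : Prop := out = make_identity_alt width height
instance (width : Int) (height : Int) (out : List (List Int)) : Decidable (Spec_make_identity width height out) := by unfold Spec_make_identity; infer_instance

-- ===== CLAIM (what is proved, stated in full; the proofs are below) =====
def Claim_equal_make_identity : Prop := ∀ (width : Int) (height : Int), Dom_make_identity width height → Spec_make_identity width height (make_identity width height)

-- ===== LEMMAS AND PROOFS =====

-- the row A builds for outer index i
def pvRowA (height i : Int) : List Int :=
  (PySem.List.pyRange 0 height 1).map (fun j => if j = i then (1 : Int) else 0)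

lemma pvRowA_length (height i : Int) : (pvRowA height i).length = height.toNat := by
  simp [pvRowA, PySem.List.length_pyRange_one]

lemma pvRow0_eq (height : Int) :
    (if 0 < height then (1 : Int) :: List.replicate (height - 1).toNat 0 else []) =
      pvRowA height 0 := by
  by_cases h : 0 < height
  · rw [if_pos h]
    unfold pvRowA
    apply List.ext_getElem
    · simp [PySem.List.length_pyRange_one]; omega
    · intro n h1 h2
      simp only [List.getElem_map, PySem.List.getElem_pyRange_one]
      cases n with
      | zero => simp
      | succ m =>
        simp only [List.getElem_cons_succ, List.getElem_replicate]
        rw [if_neg (by omega)]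
  · rw [if_neg h]
    unfold pvRowA
    rw [PySem.List.pyRange_one_eq_nil (by omega), List.map_nil]

lemma pvShift (height k : Int) (hk : 0 ≤ k) :
    PySem.List.slice ((0 : Int) :: pvRowA height k) none (some height) =
      pvRowA height (k + 1) := by
  by_cases h : 0 < height
  · rw [PySem.List.slice_to _ (by omega)]
    apply List.ext_getElem
    · simp [pvRowA, PySem.List.length_pyRange_one]
    · intro n h1 h2
      rw [List.getElem_take]
      unfold pvRowA
      simp only [List.getElem_map, PySem.List.getElem_pyRange_one]
      cases n with
      | zero =>
        simp only [List.getElem_cons_zero]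
        rw [if_neg (by omega)]
      | succ m =>
        simp only [List.getElem_cons_succ]
        simp only [List.length_take, List.length_cons, pvRowA_length] at h1
        have hm : m < (pvRowA height k).length := by
          rw [pvRowA_length]; omega
        simp only [List.getElem_map, PySem.List.getElem_pyRange_one]
        by_cases hmk : ((0:Int) + m) = k
        · rw [if_pos hmk, if_pos (by push_cast; omega)]
        · rw [if_neg hmk, if_neg (by push_cast at hmk ⊢; omega)]
  · have hr : pvRowA height k = [] := by
      unfold pvRowA
      rw [PySem.List.pyRange_one_eq_nil (by omega), List.map_nil]
    have hr' : pvRowA height (k + 1) = [] := by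
      unfold pvRowA
      rw [PySem.List.pyRange_one_eq_nil (by omega), List.map_nil]
    rw [hr, hr']
    by_cases h0 : height = 0
    · rw [h0, PySem.List.slice_to _ (by omega)]
      simp
    · have hneg : height = -(((-height).toNat : Nat) : Int) := by omega
      rw [hneg, PySem.List.slice_to_neg_natCast _ _ (by omega)]
      simp only [List.length_cons, List.length_nil]
      rw [List.take_eq_nil_iff.mpr]
      omega

-- invariant of B's loop: after k iterations the accumulated rows are A's first k rows
-- and the carried row is pvRowA height k
lemma pvB_inv (height : Int) (k : Nat) :
    (PySem.List.pyRange 0 (k : Int) 1).foldl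
      (fun (st : List (List Int) × List Int) _ =>
        (st.1 ++ [st.2], PySem.List.slice ((0 : Int) :: st.2) none (some height)))
      ([], pvRowA height 0)
    = ((PySem.List.pyRange 0 (k : Int) 1).map (fun i => pvRowA height i),
        pvRowA height (k : Int)) := by
  induction k with
  | zero =>
    rw [PySem.List.pyRange_one_eq_nil (by omega)]
    simp
  | succ k ih =>
    rw [show ((k + 1 : Nat) : Int) = ((k : Nat) : Int) + 1 by push_cast; ring,
      PySem.List.pyRange_one_succ_right (by omega),
      List.foldl_append, ih]
    simp only [List.foldl_cons, List.foldl_nil, List.map_append, List.map_cons, List.map_nil]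
    exact Prod.ext rfl (pvShift height (k : Int) (by omega))

lemma pvA_eq_map (width height : Int) :
    make_identity width height
      = (PySem.List.pyRange 0 width 1).map (fun i => pvRowA height i) := by
  unfold make_identity pvRowA
  rw [PySem.List.foldl_append_singleton_eq_map, List.nil_append]
  refine List.map_congr_left (fun i _ => ?_)
  rw [PySem.List.foldl_append_singleton_eq_map, List.nil_append]

-- ===== VERDICT (by name: the statement is the Claim_ definition above) =====
theorem make_identity_spec : Claim_equal_make_identity := by
  intro width height _
  show make_identity width height = make_identity_alt width height
  unfold make_identity_alt
  rw [pvRow0_eq, pvA_eq_map]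
  by_cases hw : 0 ≤ width
  · rw [show width = (width.toNat : Int) by omega]
    exact (congrArg Prod.fst (pvB_inv height width.toNat)).symm
  · rw [PySem.List.pyRange_one_eq_nil (by omega)]
    simp
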